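-- pv_equiv track=rewrite | github.com/felixrauh/conference_scheduler | src/matching_pipeline.py | compute_achievable_attendance
-- ===== SOURCE A (Python) =====
-- from typing import Dict, List, Set, Tuple, Optional, FrozenSet
--
-- def compute_achievable_attendance(
--     ordered_blocks: List[Tuple[str, ...]],
--     participant_prefs: Set[str]
-- ) -> int:
--     """
--     Compute maximum talks a participant can attend via room-hopping.
--
--     At each timeslot, the participant can choose any one talk from any block.
--     They maximize total attended talks.
--
--     Args:
--         ordered_blocks: List of blocks, each with talks in order
--         participant_prefs: Set of preferred talk_ids
--
--     Returns:
--         Maximum number of talks the participant can attend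
--     """
--     if not ordered_blocks:
--         return 0
--
--     k = len(ordered_blocks[0])  # talks per block
--     attended = 0
--
--     for slot in range(k):
--         # At this timeslot, check each block for a preferred talk
--         for block in ordered_blocks:
--             if slot < len(block) and block[slot] in participant_prefs:
--                 attended += 1
--                 break  # Can only attend one talk per slot
--
--     return attended
-- ===== SOURCE B (Python) =====
-- def compute_achievable_attendance(ordered_blocks, participant_prefs):
--     """Block-major scan: collect the distinct covered slot indices, then count them."""
--     if not ordered_blocks:
--         return 0
--     k = len(ordered_blocks[0])
--     covered = set()
--     for block in ordered_blocks:
--         for idx, talk in enumerate(block):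
--             if idx < k and talk in participant_prefs:
--                 covered.add(idx)
--     return len(covered)
-- ===== Notes on version B (the rewrite author's own statement) =====
-- stated objective: alternative
-- what changed: Replaces the slot-outer loop with an inner per-slot scan-and-break over blocks by a single block-major pass that accumulates the set of distinct covered slot indices and returns its size.
import Mathlib
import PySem

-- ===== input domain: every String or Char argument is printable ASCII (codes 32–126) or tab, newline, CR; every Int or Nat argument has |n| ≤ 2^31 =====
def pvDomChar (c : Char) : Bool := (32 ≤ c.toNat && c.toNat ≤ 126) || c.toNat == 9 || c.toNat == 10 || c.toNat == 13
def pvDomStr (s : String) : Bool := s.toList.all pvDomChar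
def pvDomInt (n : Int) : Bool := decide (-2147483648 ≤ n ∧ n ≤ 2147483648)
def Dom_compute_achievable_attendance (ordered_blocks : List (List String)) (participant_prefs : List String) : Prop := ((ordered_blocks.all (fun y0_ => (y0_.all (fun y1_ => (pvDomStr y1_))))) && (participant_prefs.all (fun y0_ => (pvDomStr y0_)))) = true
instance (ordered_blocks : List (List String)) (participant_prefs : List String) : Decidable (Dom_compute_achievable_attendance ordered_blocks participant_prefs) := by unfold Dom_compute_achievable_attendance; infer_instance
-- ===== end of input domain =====

-- B replaces A's slot-outer loop (inner scan over blocks with an early break per slot) by a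
-- block-major pass that accumulates the set of distinct covered slot indices and returns its size.


-- ===== PORT A =====
-- the inner 'for block in ordered_blocks: … break' loop: first block with a preferred talk at 'slot'
def pvInnerA (participant_prefs : List String) (slot : Int) : List (List String) → Bool
  | [] => false
  | b :: rest =>
    if decide (slot < (b.length : Int)) && participant_prefs.contains (PySem.List.pyGetD b slot "") then
      true  -- break
    else pvInnerA participant_prefs slot rest

def compute_achievable_attendance (ordered_blocks : List (List String)) (participant_prefs : List String) : Int :=
  match ordered_blocks with
  | [] => 0
  | b0 :: _ =>
    let k : Int := (b0.length : Int)
    (PySem.List.pyRange 0 k 1).foldl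
      (fun attended slot =>
        if pvInnerA participant_prefs slot ordered_blocks then attended + 1 else attended) 0

-- ===== PORT B =====
def compute_achievable_attendance_alt (ordered_blocks : List (List String)) (participant_prefs : List String) : Int :=
  match ordered_blocks with
  | [] => 0
  | b0 :: _ =>
    let k : Int := (b0.length : Int)
    let covered : PySem.Set Int :=
      ordered_blocks.foldl
        (fun cov block =>
          (PySem.List.enumerate block 0).foldl
            (fun cov p =>
              if decide (p.1 < k) && participant_prefs.contains p.2 then PySem.Set.add cov p.1 else cov)
            cov)
        PySem.Set.empty
    PySem.Set.len covered

-- ===== PRECONDITION & SPEC =====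
def Spec_compute_achievable_attendance (ordered_blocks : List (List String)) (participant_prefs : List String) (out : Int) : Prop := out = compute_achievable_attendance_alt ordered_blocks participant_prefs
instance (ordered_blocks : List (List String)) (participant_prefs : List String) (out : Int) : Decidable (Spec_compute_achievable_attendance ordered_blocks participant_prefs out) := by unfold Spec_compute_achievable_attendance; infer_instance

-- ===== CLAIM (what is proved, stated in full; the proofs are below) =====
def Claim_equal_compute_achievable_attendance : Prop := ∀ (ordered_blocks : List (List String)) (participant_prefs : List String), Dom_compute_achievable_attendance ordered_blocks participant_prefs → Spec_compute_achievable_attendance ordered_blocks participant_prefs (compute_achievable_attendance ordered_blocks participant_prefs)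

-- ===== LEMMAS AND PROOFS =====

-- B's inner fold over one block's enumerate list: membership and nodup
lemma pvInnerB_mem (prefs : List String) (k : Int) (L : List (Int × String)) (c : List Int) (s : Int) :
    s ∈ L.foldl (fun cov p => if decide (p.1 < k) && prefs.contains p.2 then PySem.Set.add cov p.1 else cov) c
      ↔ s ∈ c ∨ ∃ p ∈ L, p.1 < k ∧ prefs.contains p.2 = true ∧ s = p.1 := by
  induction L generalizing c with
  | nil => simp
  | cons q L ih =>
    simp only [List.foldl_cons, ih]
    by_cases h1 : q.1 < k <;> by_cases h2 : q.2 ∈ prefs <;>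
      simp [h1, h2, PySem.Set.mem_add] <;> tauto

lemma pvInnerB_nodup (prefs : List String) (k : Int) (L : List (Int × String)) (c : List Int)
    (hc : c.Nodup) :
    (L.foldl (fun cov p => if decide (p.1 < k) && prefs.contains p.2 then PySem.Set.add cov p.1 else cov) c).Nodup := by
  induction L generalizing c with
  | nil => exact hc
  | cons q L ih =>
    simp only [List.foldl_cons]
    split
    · exact ih _ (PySem.Set.nodup_add c q.1 hc)
    · exact ih _ hc

-- B's outer fold over blocks: membership and nodup
lemma pvOuterB_mem (prefs : List String) (k : Int) (l : List (List String)) (c : List Int) (s : Int) :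
    s ∈ l.foldl (fun cov block =>
          (PySem.List.enumerate block 0).foldl
            (fun cov p => if decide (p.1 < k) && prefs.contains p.2 then PySem.Set.add cov p.1 else cov) cov) c
      ↔ s ∈ c ∨ ∃ b ∈ l, ∃ p ∈ PySem.List.enumerate b 0, p.1 < k ∧ prefs.contains p.2 = true ∧ s = p.1 := by
  induction l generalizing c with
  | nil => simp
  | cons b l ih =>
    simp only [List.foldl_cons, ih, pvInnerB_mem, List.mem_cons]
    aesop

lemma pvOuterB_nodup (prefs : List String) (k : Int) (l : List (List String)) (c : List Int)
    (hc : c.Nodup) :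
    (l.foldl (fun cov block =>
          (PySem.List.enumerate block 0).foldl
            (fun cov p => if decide (p.1 < k) && prefs.contains p.2 then PySem.Set.add cov p.1 else cov) cov) c).Nodup := by
  induction l generalizing c with
  | nil => exact hc
  | cons b l ih => exact ih _ (pvInnerB_nodup prefs k _ c hc)

-- A's inner break-loop is an existential over blocks
lemma pvInnerA_iff (prefs : List String) (slot : Int) (l : List (List String)) :
    pvInnerA prefs slot l = true ↔
      ∃ b ∈ l, slot < (b.length : Int) ∧ prefs.contains (PySem.List.pyGetD b slot "") = true := by
  induction l with
  | nil => simp [pvInnerA]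
  | cons b l ih =>
    simp only [pvInnerA]
    by_cases h1 : slot < (b.length : Int) <;>
      by_cases h2 : prefs.contains (PySem.List.pyGetD b slot "") = true <;>
        simp [h1, h2, ih] <;> tauto

-- the two per-slot conditions agree on 0 ≤ slot < k
lemma pvCond_bridge (prefs : List String) (k slot : Int) (h0 : 0 ≤ slot) (hk : slot < k)
    (b : List String) :
    (slot < (b.length : Int) ∧ prefs.contains (PySem.List.pyGetD b slot "") = true) ↔
      ∃ p ∈ PySem.List.enumerate b 0, p.1 < k ∧ prefs.contains p.2 = true ∧ slot = p.1 := by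
  constructor
  · rintro ⟨hlen, hmem⟩
    have hlt : slot.toNat < b.length := by omega
    refine ⟨(slot, b[slot.toNat]), ?_, hk, ?_, rfl⟩
    · rw [PySem.List.mem_enumerate_iff]
      refine ⟨slot.toNat, hlt, ?_⟩
      simp [Prod.ext_iff]
      omega
    · rwa [PySem.List.pyGetD_eq_getElem b "" h0 hlen] at hmem
  · rintro ⟨p, hp, hpk, hmem, hs⟩
    rw [PySem.List.mem_enumerate_iff] at hp
    obtain ⟨n, hn, rfl⟩ := hp
    simp only [zero_add] at hpk hmem hs
    subst hs
    refine ⟨by exact_mod_cast hn, ?_⟩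
    rw [PySem.List.pyGetD_eq_getElem b "" (by positivity) (by exact_mod_cast hn)]
    simpa using hmem

-- ===== VERDICT (by name: the statement is the Claim_ definition above) =====
theorem compute_achievable_attendance_spec : Claim_equal_compute_achievable_attendance := by
  intro ordered_blocks prefs _
  unfold Spec_compute_achievable_attendance
  unfold compute_achievable_attendance compute_achievable_attendance_alt
  cases hob : ordered_blocks with
  | nil => rfl
  | cons b0 rest =>
    simp only
    set l := b0 :: rest with hl
    set k : Int := (b0.length : Int) with hkdef
    rw [PySem.List.foldl_if_add_one]
    set step := fun (cov : List Int) (block : List String) =>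
      (PySem.List.enumerate block 0).foldl
        (fun cov p => if decide (p.1 < k) && prefs.contains p.2 then PySem.Set.add cov p.1 else cov) cov
      with hstep
    have hnodupB : (l.foldl step PySem.Set.empty).Nodup :=
      pvOuterB_nodup prefs k l _ List.nodup_nil
    have hnodupA : ((PySem.List.pyRange 0 k 1).filter (fun s => pvInnerA prefs s l)).Nodup :=
      (PySem.List.nodup_pyRange_one 0 k).filter _
    have hmem : ∀ s : Int, s ∈ (PySem.List.pyRange 0 k 1).filter (fun s => pvInnerA prefs s l) ↔
        s ∈ l.foldl step PySem.Set.empty := by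
      intro s
      rw [List.mem_filter, PySem.List.mem_pyRange_one, hstep, pvOuterB_mem]
      constructor
      · rintro ⟨⟨h0, hsk⟩, hA⟩
        rw [pvInnerA_iff] at hA
        obtain ⟨b, hb, hcond⟩ := hA
        exact Or.inr ⟨b, hb, (pvCond_bridge prefs k s h0 hsk b).mp hcond⟩
      · rintro (h | ⟨b, hb, p, hp, hpk, hmemp, hs⟩)
        · simp [PySem.Set.empty] at h
        · have h0 : 0 ≤ s := by
            rw [PySem.List.mem_enumerate_iff] at hp
            obtain ⟨n, hn, rfl⟩ := hp
            simp only [zero_add] at hs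
            omega
          have hsk : s < k := hs ▸ hpk
          refine ⟨⟨h0, hsk⟩, ?_⟩
          rw [pvInnerA_iff]
          exact ⟨b, hb, (pvCond_bridge prefs k s h0 hsk b).mpr ⟨p, hp, hpk, hmemp, hs⟩⟩
    have hperm : ((PySem.List.pyRange 0 k 1).filter (fun s => pvInnerA prefs s l)).Perm
        (l.foldl step PySem.Set.empty) :=
      (List.perm_ext_iff_of_nodup hnodupA hnodupB).mpr hmem
    have hlen := hperm.length_eq
    rw [List.countP_eq_length_filter]
    simp [PySem.Set.len, hlen]
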